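-- pv_equiv track=rewrite | github.com/felixseriksson/competitive | pokval21/bikupor.py | kcalc
-- ===== SOURCE A (Python) =====
-- def kcalc(origk, orign, roundwetake, roundnodes, tak, neighb, av):
--     ret = origk
--     # ret -= (orign - upper)
--     ret -= len(tak)
--     if roundnodes:
--         mini = min(min(roundwetake), -1*max(roundnodes))
--         maxi = max(max(roundwetake), -1*min(roundnodes))
--     else:
--         mini = min(roundwetake)
--         maxi = max(roundwetake)
--     ret -= sum([1 for k in range(mini, maxi+1) if k not in roundwetake and -1*k not in roundnodes])
--     return ret
-- ===== SOURCE B (Python) =====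
-- def kcalc(origk, orign, roundwetake, roundnodes, tak, neighb, av):
--     points = list(roundwetake) + [-n for n in roundnodes]
--     return origk - len(tak) - (max(points) - min(points) + 1 - len(set(points)))
-- ===== Notes on version B (the rewrite author's own statement) =====
-- stated objective: faster
-- what changed: Builds one combined list of covered points (roundwetake plus negated roundnodes), so min/max come from a single list with no branching on roundnodes and the hole count is the span length minus the number of distinct points, eliminating A's per-integer scan of range(mini, maxi+1).
import Mathlib
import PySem

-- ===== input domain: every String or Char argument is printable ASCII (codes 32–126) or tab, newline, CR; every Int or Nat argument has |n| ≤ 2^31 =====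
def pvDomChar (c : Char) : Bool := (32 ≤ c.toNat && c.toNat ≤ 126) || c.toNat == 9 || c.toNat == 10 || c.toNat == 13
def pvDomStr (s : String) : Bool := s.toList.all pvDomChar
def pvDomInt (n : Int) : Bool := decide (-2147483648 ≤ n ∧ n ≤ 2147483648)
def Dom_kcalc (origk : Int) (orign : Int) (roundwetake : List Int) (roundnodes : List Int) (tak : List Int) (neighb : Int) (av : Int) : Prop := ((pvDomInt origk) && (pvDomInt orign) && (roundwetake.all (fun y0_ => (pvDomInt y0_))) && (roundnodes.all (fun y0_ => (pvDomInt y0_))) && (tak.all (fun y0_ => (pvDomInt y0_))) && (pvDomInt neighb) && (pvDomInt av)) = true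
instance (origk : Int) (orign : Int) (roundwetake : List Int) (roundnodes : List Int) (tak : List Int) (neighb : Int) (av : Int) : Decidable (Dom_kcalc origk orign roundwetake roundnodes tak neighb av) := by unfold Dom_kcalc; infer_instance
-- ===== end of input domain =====

-- B builds one combined list of covered points (roundwetake ++ negated roundnodes): min/max are
-- taken over that single list and the hole count is span length minus distinct points,
-- replacing A's branch on roundnodes and per-integer scan of range(mini, maxi+1) (objective: faster).

-- ===== PORT A =====
def kcalc (origk : Int) (orign : Int) (roundwetake : List Int) (roundnodes : List Int) (tak : List Int) (neighb : Int) (av : Int) : Int :=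
  let ret := origk
  let ret := ret - (tak.length : Int)
  let mm : Int × Int :=
    if roundnodes ≠ [] then
      (min ((PySem.List.min? roundwetake (fun x => x)).getD 0) (-1 * (PySem.List.max? roundnodes (fun x => x)).getD 0),
       max ((PySem.List.max? roundwetake (fun x => x)).getD 0) (-1 * (PySem.List.min? roundnodes (fun x => x)).getD 0))
    else
      ((PySem.List.min? roundwetake (fun x => x)).getD 0,
       (PySem.List.max? roundwetake (fun x => x)).getD 0)
  let mini := mm.1
  let maxi := mm.2
  let ret := ret - (((PySem.List.pyRange mini (maxi + 1) 1).filter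
      (fun k => !(roundwetake.contains k) && !(roundnodes.contains (-1 * k)))).map (fun _ => (1 : Int))).sum
  ret

-- ===== PORT B =====
def kcalc_alt (origk : Int) (orign : Int) (roundwetake : List Int) (roundnodes : List Int) (tak : List Int) (neighb : Int) (av : Int) : Int :=
  let points := roundwetake ++ roundnodes.map (fun n => -n)
  origk - (tak.length : Int) -
    (((PySem.List.max? points (fun x => x)).getD 0 - (PySem.List.min? points (fun x => x)).getD 0 + 1)
      - (PySem.Set.len (PySem.Set.ofList points) : Int))

-- ===== PRECONDITION & SPEC =====
-- Pre_ excludes roundwetake = [], on which Python A raises ValueError (min of an empty sequence).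
def Pre_kcalc (origk : Int) (orign : Int) (roundwetake : List Int) (roundnodes : List Int) (tak : List Int) (neighb : Int) (av : Int) : Prop := roundwetake ≠ []
instance (origk : Int) (orign : Int) (roundwetake : List Int) (roundnodes : List Int) (tak : List Int) (neighb : Int) (av : Int) : Decidable (Pre_kcalc origk orign roundwetake roundnodes tak neighb av) := by unfold Pre_kcalc; infer_instance
def pvWitness_kcalc : Int × Int × List Int × List Int × List Int × Int × Int := (10, 5, [1, 3], [-2], [4], 0, 0)

def Spec_kcalc (origk : Int) (orign : Int) (roundwetake : List Int) (roundnodes : List Int) (tak : List Int) (neighb : Int) (av : Int) (out : Int) : Prop := out = kcalc_alt origk orign roundwetake roundnodes tak neighb av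
instance (origk : Int) (orign : Int) (roundwetake : List Int) (roundnodes : List Int) (tak : List Int) (neighb : Int) (av : Int) (out : Int) : Decidable (Spec_kcalc origk orign roundwetake roundnodes tak neighb av out) := by unfold Spec_kcalc; infer_instance

-- ===== CLAIM (what is proved, stated in full; the proofs are below) =====
def Claim_equal_kcalc : Prop := ∀ (origk : Int) (orign : Int) (roundwetake : List Int) (roundnodes : List Int) (tak : List Int) (neighb : Int) (av : Int), Dom_kcalc origk orign roundwetake roundnodes tak neighb av → Pre_kcalc origk orign roundwetake roundnodes tak neighb av → Spec_kcalc origk orign roundwetake roundnodes tak neighb av (kcalc origk orign roundwetake roundnodes tak neighb av)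

-- ===== LEMMAS AND PROOFS =====

-- membership in the combined points list
theorem mem_points (rw rn : List Int) (x : Int) :
    x ∈ rw ++ rn.map (fun n => -n) ↔ x ∈ rw ∨ -x ∈ rn := by
  simp only [List.mem_append, List.mem_map]
  constructor
  · rintro (h | ⟨n, hn, rfl⟩)
    · exact Or.inl h
    · right; simpa using hn
  · rintro (h | h)
    · exact Or.inl h
    · exact Or.inr ⟨-x, h, by ring⟩

-- counting covered points inside a nodup list that contains them all
theorem filter_mem_length {S R : List Int} (hS : S.Nodup) (hR : R.Nodup)
    (hsub : ∀ x ∈ S, x ∈ R) : (R.filter (fun k => S.contains k)).length = S.length := by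
  apply List.Perm.length_eq
  apply (List.perm_ext_iff_of_nodup (hR.filter _) hS).2
  intro x
  simp only [List.mem_filter, List.contains_iff_mem]
  exact ⟨fun h => h.2, fun h => ⟨hsub x h, h⟩⟩

theorem sum_map_one (l : List Int) : (l.map (fun _ => (1 : Int))).sum = (l.length : Int) := by
  induction l with
  | nil => simp
  | cons h t ih => simp [ih]; omega

-- ===== VERDICT (by name: the statement is the Claim_ definition above) =====
theorem kcalc_spec : Claim_equal_kcalc := by
  unfold Claim_equal_kcalc
  intro origk orign rw rn tak neighb av _ hpre
  unfold Pre_kcalc at hpre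
  unfold Spec_kcalc kcalc kcalc_alt
  set mm : Int × Int :=
    (if rn ≠ [] then
      (min ((PySem.List.min? rw (fun x => x)).getD 0) (-1 * (PySem.List.max? rn (fun x => x)).getD 0),
       max ((PySem.List.max? rw (fun x => x)).getD 0) (-1 * (PySem.List.min? rn (fun x => x)).getD 0))
    else
      ((PySem.List.min? rw (fun x => x)).getD 0, (PySem.List.max? rw (fun x => x)).getD 0)) with hmm
  obtain ⟨mini, maxi⟩ := mm
  simp only [] at hmm ⊢
  -- extrema of the nonempty rw
  obtain ⟨mrw, hmrw⟩ : ∃ m, PySem.List.min? rw (fun x => x) = some m := by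
    cases h : PySem.List.min? rw (fun x => x) with
    | none => exact absurd ((PySem.List.min?_eq_none_iff _ _).1 h) hpre
    | some m => exact ⟨m, rfl⟩
  obtain ⟨Mrw, hMrw⟩ : ∃ m, PySem.List.max? rw (fun x => x) = some m := by
    cases h : PySem.List.max? rw (fun x => x) with
    | none => exact absurd ((PySem.List.max?_eq_none_iff _ _).1 h) hpre
    | some m => exact ⟨m, rfl⟩
  have hmrw_min := PySem.List.min?_isMin hmrw
  have hMrw_max := PySem.List.max?_isMax hMrw
  have hmrw_mem := PySem.List.min?_mem hmrw
  have hMrw_mem := PySem.List.max?_mem hMrw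
  -- bounds and attainment of mini/maxi on the combined points
  set P := rw ++ rn.map (fun n => -n) with hP
  have hPne : P ≠ [] := by
    intro h; exact hpre (List.append_eq_nil_iff.1 h).1
  have hkey : (∀ x ∈ P, mini ≤ x ∧ x ≤ maxi) ∧ mini ∈ P ∧ maxi ∈ P := by
    by_cases hrn : rn = []
    · subst hrn
      simp only [ne_eq, not_true_eq_false, if_false] at hmm
      rw [hmrw, hMrw] at hmm
      simp only [Option.getD_some, Prod.mk.injEq] at hmm
      obtain ⟨h1, h2⟩ := hmm
      refine ⟨?_, ?_, ?_⟩
      · intro x hx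
        rw [hP] at hx; simp only [List.map_nil, List.append_nil] at hx
        exact ⟨h1 ▸ hmrw_min x hx, h2 ▸ hMrw_max x hx⟩
      · rw [hP]; exact List.mem_append_left _ (h1 ▸ hmrw_mem)
      · rw [hP]; exact List.mem_append_left _ (h2 ▸ hMrw_mem)
    · obtain ⟨mrn, hmrn⟩ : ∃ m, PySem.List.min? rn (fun x => x) = some m := by
        cases h : PySem.List.min? rn (fun x => x) with
        | none => exact absurd ((PySem.List.min?_eq_none_iff _ _).1 h) hrn
        | some m => exact ⟨m, rfl⟩
      obtain ⟨Mrn, hMrn⟩ : ∃ m, PySem.List.max? rn (fun x => x) = some m := by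
        cases h : PySem.List.max? rn (fun x => x) with
        | none => exact absurd ((PySem.List.max?_eq_none_iff _ _).1 h) hrn
        | some m => exact ⟨m, rfl⟩
      have hmrn_min := PySem.List.min?_isMin hmrn
      have hMrn_max := PySem.List.max?_isMax hMrn
      have hmrn_mem := PySem.List.min?_mem hmrn
      have hMrn_mem := PySem.List.max?_mem hMrn
      simp only [ne_eq, hrn, not_false_eq_true, if_true] at hmm
      rw [hmrw, hMrw, hmrn, hMrn] at hmm
      simp only [Option.getD_some, Prod.mk.injEq] at hmm
      obtain ⟨h1, h2⟩ := hmm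
      refine ⟨?_, ?_, ?_⟩
      · intro x hx
        rcases (mem_points rw rn x).1 (hP ▸ hx) with h | h
        · constructor
          · rw [h1]; have := hmrw_min x h; simp only at this; omega
          · rw [h2]; have := hMrw_max x h; simp only at this; omega
        · constructor
          · rw [h1]; have := hMrn_max (-x) h; simp only at this; omega
          · rw [h2]; have := hmrn_min (-x) h; simp only at this; omega
      · rw [hP]
        rcases le_total mrw (-1 * Mrn) with hle | hle
        · have : mini = mrw := by rw [h1]; omega
          exact this ▸ List.mem_append_left _ hmrw_mem
        · have : mini = -Mrn := by rw [h1]; omega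
          rw [this]; exact (mem_points rw rn (-Mrn)).2 (Or.inr (by simpa using hMrn_mem))
      · rw [hP]
        rcases le_total Mrw (-1 * mrn) with hle | hle
        · have : maxi = -mrn := by rw [h2]; omega
          rw [this]; exact (mem_points rw rn (-mrn)).2 (Or.inr (by simpa using hmrn_mem))
        · have : maxi = Mrw := by rw [h2]; omega
          exact this ▸ List.mem_append_left _ hMrw_mem
  obtain ⟨hbounds, hminiP, hmaxiP⟩ := hkey
  -- B's min?/max? of the combined list equal mini/maxi
  obtain ⟨mP, hmP⟩ : ∃ m, PySem.List.min? P (fun x => x) = some m := by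
    cases h : PySem.List.min? P (fun x => x) with
    | none => exact absurd ((PySem.List.min?_eq_none_iff _ _).1 h) hPne
    | some m => exact ⟨m, rfl⟩
  obtain ⟨MP, hMP⟩ : ∃ m, PySem.List.max? P (fun x => x) = some m := by
    cases h : PySem.List.max? P (fun x => x) with
    | none => exact absurd ((PySem.List.max?_eq_none_iff _ _).1 h) hPne
    | some m => exact ⟨m, rfl⟩
  have hmPv : mP = mini := by
    have h1 := PySem.List.min?_isMin hmP mini hminiP
    have h2 := (hbounds mP (PySem.List.min?_mem hmP)).1
    simp only at h1; omega
  have hMPv : MP = maxi := by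
    have h1 := PySem.List.max?_isMax hMP maxi hmaxiP
    have h2 := (hbounds MP (PySem.List.max?_mem hMP)).2
    simp only at h1; omega
  rw [hmP, hMP]
  simp only [Option.getD_some, hmPv, hMPv]
  have hminmax : mini ≤ maxi := (hbounds mini hminiP).2
  -- the covered set
  set S := PySem.Set.ofList P with hS
  have hmemS : ∀ x, x ∈ S ↔ x ∈ rw ∨ -x ∈ rn := by
    intro x; rw [hS, PySem.Set.mem_ofList, hP, mem_points]
  have hSnodup : S.Nodup := PySem.Set.nodup_ofList P
  set R := PySem.List.pyRange mini (maxi + 1) 1 with hR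
  have hRnodup : R.Nodup := PySem.List.nodup_pyRange_one mini (maxi+1)
  have hsub : ∀ x ∈ S, x ∈ R := by
    intro x hx
    rw [hR, PySem.List.mem_pyRange_one]
    have := hbounds x (by rwa [hS, PySem.Set.mem_ofList] at hx)
    omega
  have hpred : ∀ k, (!(rw.contains k) && !(rn.contains (-1 * k))) = !(S.contains k) := by
    intro k
    have he : (-1 * k) = -k := by ring
    rw [he]
    by_cases h1 : k ∈ rw <;> by_cases h2 : -k ∈ rn <;>
      simp [h1, h2, hmemS k]
  have hfilter : (R.filter (fun k => !(rw.contains k) && !(rn.contains (-1 * k)))) =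
      R.filter (fun k => !(S.contains k)) := by
    apply List.filter_congr; intro k _; exact hpred k
  have hlenR : (R.length : Int) = maxi + 1 - mini := by
    rw [hR, PySem.List.length_pyRange_one]; omega
  have hsplit : R.length = (R.filter (fun k => S.contains k)).length + (R.filter (fun k => !(S.contains k))).length :=
    List.length_eq_length_filter_add (fun k => S.contains k)
  have hcov : (R.filter (fun k => S.contains k)).length = S.length := filter_mem_length hSnodup hRnodup hsub
  rw [hfilter, sum_map_one]
  have hlenS : PySem.Set.len S = S.length := rfl
  rw [hlenS]
  omega
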